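-- pv_equiv track=rewrite | github.com/Durthander/Unipr-LINTINF | Corso-Informatica e laboratorio di programmazione Python/Basi informatica-Tomaiuolo/es6 03.11.2025/6.1_Maiusc_tra_ast.py | shout
-- ===== SOURCE A (Python) =====
-- def shout(s: str) -> str:
--     result = ""
--     uppering = False
--     for a in s:
--         if a == "*":
--             uppering = not uppering
--         else:
--             if uppering:
--                 result += a.upper()
--             else:
--                 result += a
--     return result
-- ===== SOURCE B (Python) =====
-- def shout(s: str) -> str:
--     return ''.join(p.upper() if i % 2 else p for i, p in enumerate(s.split('*')))
-- ===== Notes on version B (the rewrite author's own statement) =====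
-- stated objective: idiomatic
-- what changed: Replaces the character-by-character loop with a running boolean toggle and per-character string concatenation by splitting the string on the asterisk separator and uppercasing the odd-indexed segments before joining.
import Mathlib
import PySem

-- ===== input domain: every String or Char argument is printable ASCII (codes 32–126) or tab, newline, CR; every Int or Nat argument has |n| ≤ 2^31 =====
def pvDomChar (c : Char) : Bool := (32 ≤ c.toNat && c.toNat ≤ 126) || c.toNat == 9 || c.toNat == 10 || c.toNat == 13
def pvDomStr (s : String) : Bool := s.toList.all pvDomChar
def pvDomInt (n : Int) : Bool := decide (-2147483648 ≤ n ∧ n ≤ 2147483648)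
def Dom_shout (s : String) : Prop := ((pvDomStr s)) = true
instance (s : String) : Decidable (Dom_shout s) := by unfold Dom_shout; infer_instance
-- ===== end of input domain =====

-- B replaces A's per-character boolean toggle with split-on-'*' and uppercasing the odd-indexed segments (idiomatic; same result).

-- ===== PORT A =====
-- fold over the characters carrying (result, uppering), exactly A's loop
def shout (s : String) : String :=
  String.mk (s.toList.foldl (fun (st : List Char × Bool) a =>
    if a = '*' then (st.1, !st.2)
    else if st.2 then (st.1 ++ PySem.Chars.upper [a], st.2)
    else (st.1 ++ [a], st.2)) ([], false)).1

-- ===== PORT B =====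
-- ''.join(p.upper() if i % 2 else p for i, p in enumerate(s.split('*')))
def shout_alt (s : String) : String :=
  String.mk (PySem.Chars.join []
    ((PySem.List.enumerate (PySem.Chars.splitOn s.toList ['*'])).map
      (fun ip => if PySem.Int.mod ip.1 2 ≠ 0 then PySem.Chars.upper ip.2 else ip.2)))

-- ===== PRECONDITION & SPEC =====
def Spec_shout (s : String) (out : String) : Prop := out = shout_alt s
instance (s : String) (out : String) : Decidable (Spec_shout s out) := by unfold Spec_shout; infer_instance

-- ===== CLAIM (what is proved, stated in full; the proofs are below) =====
def Claim_equal_shout : Prop := ∀ (s : String), Dom_shout s → Spec_shout s (shout s)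

-- ===== LEMMAS AND PROOFS =====

-- the toggle function, recursively (A's loop without the accumulator)
def shoutF : List Char → Bool → List Char
  | [], _ => []
  | a :: t, u =>
      if a = '*' then shoutF t (!u)
      else (if u then PySem.Chars.upperChar a else a) :: shoutF t u

lemma shout_fold_eq (l : List Char) (acc : List Char) (u : Bool) :
    (l.foldl (fun (st : List Char × Bool) a =>
      if a = '*' then (st.1, !st.2)
      else if st.2 then (st.1 ++ PySem.Chars.upper [a], st.2)
      else (st.1 ++ [a], st.2)) (acc, u)).1 = acc ++ shoutF l u := by
  induction l generalizing acc u with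
  | nil => simp [shoutF]
  | cons a t ih =>
      by_cases h : a = '*'
      · simp [h, shoutF, ih]
      · cases u
        · rw [List.foldl_cons, if_neg h]
          show (List.foldl _ (acc ++ [a], false) t).1 = _
          rw [ih]; simp [shoutF, h]
        · rw [List.foldl_cons, if_neg h]
          show (List.foldl _ (acc ++ PySem.Chars.upper [a], true) t).1 = _
          rw [ih]; simp [shoutF, h, PySem.Chars.upper]

-- structural version of s.split('*')
def sps : List Char → List (List Char)
  | [] => [[]]
  | a :: t =>
      if a = '*' then [] :: sps t
      else match sps t with
           | [] => [[a]]
           | p :: ps => (a :: p) :: ps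

lemma sps_ne_nil (l : List Char) : sps l ≠ [] := by
  cases l with
  | nil => simp [sps]
  | cons a t =>
      simp only [sps]
      split
      · simp
      · split <;> simp_all

lemma splitOn_go_eq (fuel : Nat) (l cur : List Char) (acc : List (List Char)) (h : l.length < fuel) :
    PySem.Chars.splitOn.go ['*'] fuel l cur acc =
      acc.reverse ++ (match sps l with
        | [] => []
        | p :: ps => (cur.reverse ++ p) :: ps) := by
  induction fuel generalizing l cur acc with
  | zero => omega
  | succ fuel ih =>
      cases l with
      | nil => simp [PySem.Chars.splitOn.go, sps]
      | cons c rest =>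
          have hrest : rest.length < fuel := by simp at h; omega
          by_cases hc : c = '*'
          · subst hc
            rw [PySem.Chars.splitOn.go]
            rw [if_pos (by simp [List.isPrefixOf])]
            simp only [List.length_cons, List.length_nil, List.drop_succ_cons, List.drop_zero]
            rw [ih rest [] (cur.reverse :: acc) hrest]
            cases hs : sps rest with
            | nil => exact absurd hs (sps_ne_nil rest)
            | cons p ps => simp [sps, hs]
          · rw [PySem.Chars.splitOn.go]
            rw [if_neg (by simp [List.isPrefixOf]; exact fun h => hc h.symm)]
            rw [ih rest (c :: cur) acc hrest]
            cases hs : sps rest with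
            | nil => exact absurd hs (sps_ne_nil rest)
            | cons p ps => simp [sps, hc, hs]

lemma splitOn_eq_sps (l : List Char) : PySem.Chars.splitOn l ['*'] = sps l := by
  rw [PySem.Chars.splitOn, splitOn_go_eq (l.length + 1) l [] [] (by omega)]
  cases h : sps l with
  | nil => exact absurd h (sps_ne_nil l)
  | cons p ps => simp

-- join of the parity-uppercased parts, recursively
def jA : List (List Char) → Bool → List Char
  | [], _ => []
  | p :: ps, u => (if u then PySem.Chars.upper p else p) ++ jA ps (!u)

lemma joinNilCons (x : List Char) (xs : List (List Char)) :
    PySem.Chars.join [] (x :: xs) = x ++ PySem.Chars.join [] xs := by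
  cases xs <;> simp [PySem.Chars.join, List.intercalate]

lemma join_enumerate_eq_jA (parts : List (List Char)) (n : Nat) :
    PySem.Chars.join []
      ((PySem.List.enumerate parts (n : Int)).map
        (fun ip => if PySem.Int.mod ip.1 2 ≠ 0 then PySem.Chars.upper ip.2 else ip.2))
      = jA parts (decide (n % 2 = 1)) := by
  induction parts generalizing n with
  | nil => simp [jA, PySem.Chars.join, PySem.List.enumerate, List.intercalate]
  | cons p ps ih =>
      rw [PySem.List.enumerate_cons]
      have h1 : ((n : Int) + 1) = ((n + 1 : Nat) : Int) := by push_cast; ring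
      have h2 : PySem.Int.mod (n : Int) 2 = ((n % 2 : Nat) : Int) := by
        exact_mod_cast PySem.Int.mod_natCast n 2
      rw [List.map_cons, h1, joinNilCons, ih (n + 1)]
      have hpar : decide ((n + 1) % 2 = 1) = !decide (n % 2 = 1) := by
        rcases Nat.mod_two_eq_zero_or_one n with hm | hm <;> simp [Nat.add_mod, hm]
      rw [hpar]
      simp only [jA, h2]
      by_cases hn : n % 2 = 1
      · simp [hn]
      · have h0 : n % 2 = 0 := by omega
        simp [h0]

lemma jA_sps_eq_shoutF (l : List Char) (u : Bool) : jA (sps l) u = shoutF l u := by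
  induction l generalizing u with
  | nil => simp [sps, jA, shoutF, PySem.Chars.upper]
  | cons a t ih =>
      by_cases h : a = '*'
      · simp [sps, h, jA, shoutF, PySem.Chars.upper, ← ih]
      · cases hs : sps t with
        | nil => exact absurd hs (sps_ne_nil t)
        | cons p ps =>
            have := ih u
            rw [hs] at this
            cases u <;>
              simp_all [sps, jA, shoutF, PySem.Chars.upper]

-- ===== VERDICT (by name: the statement is the Claim_ definition above) =====
theorem shout_spec : Claim_equal_shout := by
  intro s _
  unfold Spec_shout shout shout_alt
  rw [shout_fold_eq, splitOn_eq_sps]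
  have h := join_enumerate_eq_jA (sps s.toList) 0
  simp only [Nat.cast_zero] at h
  rw [h, jA_sps_eq_shoutF]
  simp
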